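-- pv_equiv track=rewrite | github.com/JamesYang-7/Controllable_PBD_3D | utils/graph_coloring.py | build_element_adjacency
-- ===== SOURCE A (Python) =====
-- def build_element_adjacency(element_indices, n_elements, verts_per_element, n_vertices):
--   """Build adjacency for elements that conflict when sharing a vertex.
--
--   Args:
--     element_indices: Flat array of vertex indices, length = n_elements * verts_per_element.
--     n_elements: Number of elements (edges, tets, etc.).
--     verts_per_element: Vertices per element (2 for edges, 4 for tets, etc.).
--     n_vertices: Total number of vertices.
--
--   Returns:
--     List of sets, where adj[i] contains indices of elements adjacent to element i.
--   """
--   vert_to_elems = [[] for _ in range(n_vertices)]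
--   for e in range(n_elements):
--     for k in range(verts_per_element):
--       v = element_indices[e * verts_per_element + k]
--       vert_to_elems[v].append(e)
--
--   adj = [set() for _ in range(n_elements)]
--   for e in range(n_elements):
--     for k in range(verts_per_element):
--       v = element_indices[e * verts_per_element + k]
--       for neighbor in vert_to_elems[v]:
--         if neighbor != e:
--           adj[e].add(neighbor)
--   return adj
-- ===== SOURCE B (Python) =====
-- def build_element_adjacency(element_indices, n_elements, verts_per_element, n_vertices):
--   """Direct definition, no inverted index: two elements are adjacent iff they
--   share a vertex, so for each vertex of each element scan all elements for
--   membership of that vertex in their slice of the flat index list."""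
--   adj = []
--   for e in range(n_elements):
--     s = set()
--     for k in range(verts_per_element):
--       v = element_indices[e * verts_per_element + k]
--       for f in range(n_elements):
--         if f != e and v in element_indices[f * verts_per_element:(f + 1) * verts_per_element]:
--           s.add(f)
--     adj.append(s)
--   return adj
-- ===== Notes on version B (the rewrite author's own statement) =====
-- stated objective: simpler
-- what changed: B drops A's vertex-to-elements inverted index entirely and uses the direct definition of adjacency: for each vertex of each element it scans all elements and tests membership of that vertex in the element's slice of the flat index list.
-- outside the precondition, e.g. on build_element_adjacency([-1, 1], 2, 1, 2): A returns [{1}, {0}], B returns [set(), set()]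
import Mathlib
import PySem

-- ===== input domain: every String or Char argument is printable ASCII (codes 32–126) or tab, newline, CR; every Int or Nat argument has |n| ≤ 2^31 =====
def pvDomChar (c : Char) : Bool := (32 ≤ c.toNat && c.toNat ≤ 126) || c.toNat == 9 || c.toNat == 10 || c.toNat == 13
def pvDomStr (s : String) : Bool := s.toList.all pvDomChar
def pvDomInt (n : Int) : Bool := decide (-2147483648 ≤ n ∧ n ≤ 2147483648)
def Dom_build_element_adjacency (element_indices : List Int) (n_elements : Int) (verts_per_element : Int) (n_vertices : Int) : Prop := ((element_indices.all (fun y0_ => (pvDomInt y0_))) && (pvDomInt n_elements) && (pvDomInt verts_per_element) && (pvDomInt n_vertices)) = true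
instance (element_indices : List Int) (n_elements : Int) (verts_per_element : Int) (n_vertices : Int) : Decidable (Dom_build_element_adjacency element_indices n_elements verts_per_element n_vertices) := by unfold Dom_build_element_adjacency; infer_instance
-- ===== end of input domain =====

-- B drops A's vertex-to-elements inverted index and uses the direct definition of adjacency — for each
-- vertex of each element it scans all elements for membership of that vertex in their slice of the flat
-- list; shorter and plainer, not faster (objective: simpler).

-- ===== PORT A =====
def build_element_adjacency (element_indices : List Int) (n_elements : Int) (verts_per_element : Int) (n_vertices : Int) : List (List Int) :=
  -- vert_to_elems = [[] for _ in range(n_vertices)]; for e …: for k …: v = element_indices[e*vpe+k]; vert_to_elems[v].append(e)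
  let v2e : List (List Int) :=
    (PySem.List.pyRange 0 n_elements 1).foldl (fun v2e e =>
      (PySem.List.pyRange 0 verts_per_element 1).foldl (fun v2e k =>
        let v := PySem.List.pyGetD element_indices (e * verts_per_element + k) 0
        PySem.List.pySetD v2e v (PySem.List.pyGetD v2e v [] ++ [e])) v2e)
      (List.replicate n_vertices.toNat [])
  -- adj = [set() …]; for e …: for k …: v = …; for neighbor in vert_to_elems[v]: if neighbor != e: adj[e].add(neighbor)
  (PySem.List.pyRange 0 n_elements 1).foldl (fun adj e =>
      (PySem.List.pyRange 0 verts_per_element 1).foldl (fun adj k =>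
        let v := PySem.List.pyGetD element_indices (e * verts_per_element + k) 0
        (PySem.List.pyGetD v2e v []).foldl (fun adj nb =>
          if nb ≠ e then PySem.List.pySetD adj e (PySem.Set.add (PySem.List.pyGetD adj e []) nb) else adj) adj) adj)
    (List.replicate n_elements.toNat ([] : List Int))

-- ===== PORT B =====
def build_element_adjacency_alt (element_indices : List Int) (n_elements : Int) (verts_per_element : Int) (n_vertices : Int) : List (List Int) :=
  -- adj = []; for e in range(n_elements): s = set(); for k …: v = element_indices[e*vpe+k];
  --   for f in range(n_elements): if f != e and v in element_indices[f*vpe:(f+1)*vpe]: s.add(f)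
  --   adj.append(s)
  (PySem.List.pyRange 0 n_elements 1).foldl (fun adj e =>
    adj ++ [(PySem.List.pyRange 0 verts_per_element 1).foldl (fun s k =>
      let v := PySem.List.pyGetD element_indices (e * verts_per_element + k) 0
      (PySem.List.pyRange 0 n_elements 1).foldl (fun s f =>
        if f ≠ e ∧ (PySem.List.slice element_indices (some (f * verts_per_element)) (some ((f + 1) * verts_per_element))).contains v = true
        then PySem.Set.add s f else s) s) ([] : List Int)]) []

-- ===== PRECONDITION & SPEC =====
-- Pre_ excludes (a) the inputs where both Pythons raise IndexError because the flat list is shorter than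
-- n_elements*verts_per_element, and (b) inputs with a negative used vertex index, on which A either raises
-- IndexError (v < -n_vertices) or wraps around into vert_to_elems — an accident of Python negative indexing
-- no caller would specify — while B matches the raw value by membership.
def Pre_build_element_adjacency (element_indices : List Int) (n_elements : Int) (verts_per_element : Int) (n_vertices : Int) : Prop :=
  (0 < n_elements ∧ 0 < verts_per_element) →
    (n_elements * verts_per_element ≤ element_indices.length ∧
     ∀ v ∈ element_indices.take (n_elements * verts_per_element).toNat, 0 ≤ v ∧ v < n_vertices)
instance (element_indices : List Int) (n_elements : Int) (verts_per_element : Int) (n_vertices : Int) : Decidable (Pre_build_element_adjacency element_indices n_elements verts_per_element n_vertices) := by unfold Pre_build_element_adjacency; infer_instance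

def pvWitness_build_element_adjacency : List Int × Int × Int × Int := ([0, 1, 1, 2], 2, 2, 3)

def Spec_build_element_adjacency (element_indices : List Int) (n_elements : Int) (verts_per_element : Int) (n_vertices : Int) (out : List (List Int)) : Prop := out = build_element_adjacency_alt element_indices n_elements verts_per_element n_vertices
instance (element_indices : List Int) (n_elements : Int) (verts_per_element : Int) (n_vertices : Int) (out : List (List Int)) : Decidable (Spec_build_element_adjacency element_indices n_elements verts_per_element n_vertices out) := by unfold Spec_build_element_adjacency; infer_instance

-- ===== CLAIM (what is proved, stated in full; the proofs are below) =====
def Claim_equal_build_element_adjacency : Prop := ∀ (element_indices : List Int) (n_elements : Int) (verts_per_element : Int) (n_vertices : Int), Dom_build_element_adjacency element_indices n_elements verts_per_element n_vertices → Pre_build_element_adjacency element_indices n_elements verts_per_element n_vertices → Spec_build_element_adjacency element_indices n_elements verts_per_element n_vertices (build_element_adjacency element_indices n_elements verts_per_element n_vertices)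

-- ===== LEMMAS AND PROOFS =====

-- the per-element chunk of the flat list read by index arithmetic, as both ports read it
def chunkF (ei : List Int) (vpe : Int) (e : Nat) : List Int :=
  (PySem.List.pyRange 0 vpe 1).map (fun k => PySem.List.pyGetD ei ((e : Int) * vpe + k) 0)

-- A's first pass (the inverted index), named so the normal forms can talk about it
def v2eF (ei : List Int) (ne vpe nv : Int) : List (List Int) :=
  (PySem.List.pyRange 0 ne 1).foldl (fun v2e e =>
    (PySem.List.pyRange 0 vpe 1).foldl (fun v2e k =>
      let v := PySem.List.pyGetD ei (e * vpe + k) 0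
      PySem.List.pySetD v2e v (PySem.List.pyGetD v2e v [] ++ [e])) v2e)
    (List.replicate nv.toNat [])

theorem pyRange_zero_toNat (b : Int) :
    PySem.List.pyRange 0 b 1 = (List.range b.toNat).map (fun (i : Nat) => (i : Int)) := by
  by_cases hb : 0 ≤ b
  · rw [← Int.toNat_of_nonneg hb]
    exact PySem.List.pyRange_zero_natCast b.toNat
  · have h1 : b.toNat = 0 := Int.toNat_of_nonpos (by omega)
    rw [h1]
    refine List.eq_nil_iff_forall_not_mem.mpr (fun x hx => ?_)
    have := (PySem.List.mem_pyRange_one).mp hx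
    omega

theorem setfold {γ : Type} (g : List Int → γ → List Int) (i : Nat) :
    ∀ (ys : List γ) (adj : List (List Int)),
      ys.foldl (fun adj y => adj.set i (g (adj.getD i []) y)) adj
        = adj.set i (ys.foldl g (adj.getD i []))
  | [], adj => by
      by_cases h : i < adj.length
      · simp [List.getD_eq_getElem?_getD, List.getElem?_eq_getElem h, List.set_getElem_self]
      · rw [List.foldl_nil, List.set_eq_of_length_le (Nat.le_of_not_lt h)]
  | y :: ys, adj => by
      by_cases h : i < adj.length
      · rw [List.foldl_cons, setfold g i ys]
        have h2 : (adj.set i (g (adj.getD i []) y)).getD i [] = g (adj.getD i []) y := by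
          simp [List.getD_eq_getElem?_getD, h]
        rw [h2, List.set_set, List.foldl_cons]
      · have hid : ∀ s, adj.set i s = adj := fun s => List.set_eq_of_length_le (Nat.le_of_not_lt h)
        rw [List.foldl_cons, hid, setfold g i ys, hid, hid]

theorem foldset_range_aux (F : Nat → List Int → List Int) (n : Nat) :
    ∀ (m : Nat), m ≤ n →
      (List.range m).foldl (fun adj i => adj.set i (F i (adj.getD i []))) (List.replicate n ([] : List Int))
        = (List.range m).map (fun i => F i []) ++ List.replicate (n - m) ([] : List Int)
  | 0, _ => by simp
  | m + 1, hm => by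
      rw [List.range_succ, List.foldl_append, foldset_range_aux F n m (by omega),
        List.foldl_cons, List.foldl_nil]
      have hlen : ((List.range m).map (fun i => F i ([] : List Int))).length = m := by simp
      have hget : ((List.range m).map (fun i => F i ([] : List Int))
          ++ List.replicate (n - m) ([] : List Int)).getD m [] = [] := by
        rw [List.getD_eq_getElem?_getD, List.getElem?_append_right (by simp)]
        rw [hlen, List.getElem?_replicate]
        simp only [Nat.sub_self]
        rw [if_pos (by omega)]
        rfl
      have hrep : List.replicate (n - m) ([] : List Int)
          = [] :: List.replicate (n - m - 1) ([] : List Int) := by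
        rw [← List.replicate_succ]; congr 1; omega
      rw [hget, hrep, List.set_append_right _ _ (by omega), hlen]
      simp [Nat.sub_sub]

theorem adj_eq (read : Int → Int → Int) (rng : List Int) (v2e : List (List Int)) (n : Nat) :
    List.foldl (fun adj e => List.foldl (fun adj k =>
        List.foldl (fun adj nb =>
            if nb ≠ e then PySem.List.pySetD adj e (PySem.Set.add (PySem.List.pyGetD adj e []) nb) else adj) adj
          (PySem.List.pyGetD v2e (read e k) []))
        adj rng)
      (List.replicate n ([] : List Int)) (List.map (fun (i : Nat) => ((i : Int))) (List.range n))
  = List.map (fun (i : Nat) => PySem.Set.ofList (List.filter (fun f => decide (f ≠ (i : Int)))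
        (List.flatMap (fun v => PySem.List.pyGetD v2e v []) (rng.map (read (i : Int))))))
      (List.range n) := by
  rw [List.foldl_map]
  have hbody : ∀ (adj : List (List Int)) (i : Nat),
      rng.foldl (fun adj k =>
          (PySem.List.pyGetD v2e (read (i : Int) k) []).foldl (fun adj nb =>
            if nb ≠ (i : Int) then
              PySem.List.pySetD adj (i : Int) (PySem.Set.add (PySem.List.pyGetD adj (i : Int) []) nb)
            else adj) adj) adj
        = adj.set i (rng.foldl (fun s k =>
            ((PySem.List.pyGetD v2e (read (i : Int) k) []).filter
              (fun nb => decide (nb ≠ (i : Int)))).foldl PySem.Set.add s) (adj.getD i [])) := by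
    intro adj i
    have hinner : ∀ (adj : List (List Int)) (k : Int),
        (PySem.List.pyGetD v2e (read (i : Int) k) []).foldl (fun adj nb =>
            if nb ≠ (i : Int) then
              PySem.List.pySetD adj (i : Int) (PySem.Set.add (PySem.List.pyGetD adj (i : Int) []) nb)
            else adj) adj
          = adj.set i (((PySem.List.pyGetD v2e (read (i : Int) k) []).filter
              (fun nb => decide (nb ≠ (i : Int)))).foldl PySem.Set.add (adj.getD i [])) := by
      intro adj k
      rw [PySem.List.foldl_ite_eq_foldl_filter (p := fun nb => nb ≠ (i : Int))
        (f := fun adj nb => PySem.List.pySetD adj (i : Int)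
          (PySem.Set.add (PySem.List.pyGetD adj (i : Int) []) nb))]
      have h := setfold (g := PySem.Set.add) i
        ((PySem.List.pyGetD v2e (read (i : Int) k) []).filter (fun nb => decide (nb ≠ (i : Int)))) adj
      simpa [PySem.List.pySetD_natCast, PySem.List.pyGetD_natCast] using h
    simp only [hinner]
    exact setfold (g := fun s k =>
        ((PySem.List.pyGetD v2e (read (i : Int) k) []).filter
          (fun nb => decide (nb ≠ (i : Int)))).foldl PySem.Set.add s) i rng adj
  simp only [hbody]
  rw [foldset_range_aux (fun i s => List.foldl (fun s k =>
      List.foldl PySem.Set.add s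
        (List.filter (fun nb => decide (nb ≠ (i : Int))) (PySem.List.pyGetD v2e (read (i : Int) k) []))) s rng)
    n n le_rfl]
  simp only [Nat.sub_self, List.replicate_zero, List.append_nil]
  refine List.map_congr_left ?_
  intro i _
  rw [PySem.Set.ofList_eq_foldl, List.filter_flatMap, List.foldl_flatMap, List.foldl_map]

-- A in normal form: one set per element, built from the inverted index v2eF
theorem A_norm (ei : List Int) (ne vpe nv : Int) :
    build_element_adjacency ei ne vpe nv
      = (List.range ne.toNat).map (fun e =>
          PySem.Set.ofList (((chunkF ei vpe e).flatMap
              (fun v => PySem.List.pyGetD (v2eF ei ne vpe nv) v [])).filter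
            (fun f => decide (f ≠ (e : Int))))) := by
  simp only [build_element_adjacency, v2eF]
  rw [pyRange_zero_toNat ne, adj_eq]
  simp only [chunkF]

-- B in normal form
theorem B_norm (ei : List Int) (ne vpe nv : Int) :
    build_element_adjacency_alt ei ne vpe nv
      = (List.range ne.toNat).map (fun e =>
          (chunkF ei vpe e).foldl (fun s v =>
            (List.range ne.toNat).foldl (fun s (f : Nat) =>
              if (f : Int) ≠ (e : Int) ∧ (PySem.List.slice ei (some ((f : Int) * vpe)) (some (((f : Int) + 1) * vpe))).contains v = true
              then PySem.Set.add s (f : Int) else s) s) ([] : List Int)) := by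
  simp only [build_element_adjacency_alt, chunkF]
  rw [PySem.List.foldl_append_singleton_eq_map, pyRange_zero_toNat ne, List.map_map]
  simp only [List.nil_append, List.foldl_map]
  rfl

-- one build step of the inverted index: appending one element's chunk
theorem inner_step (N : Nat) (z : Int) :
    ∀ (cs : List Int) (st : List (List Int)), st.length = N →
      (∀ v ∈ cs, 0 ≤ v ∧ v < (N : Int)) →
      (cs.foldl (fun st v => PySem.List.pySetD st v (PySem.List.pyGetD st v [] ++ [z])) st).length = N ∧
      ∀ j : Nat, j < N →
        (cs.foldl (fun st v => PySem.List.pySetD st v (PySem.List.pyGetD st v [] ++ [z])) st).getD j []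
          = st.getD j [] ++ (cs.filter (fun x => decide (x = (j : Int)))).map (fun _ => z)
  | [], st, hlen, _ => by simp [hlen]
  | v :: cs, st, hlen, hb => by
      have hv := hb v (List.mem_cons_self)
      have hvN : v.toNat < N := by omega
      have hset : PySem.List.pySetD st v (PySem.List.pyGetD st v [] ++ [z])
          = st.set v.toNat (st.getD v.toNat [] ++ [z]) := by
        rw [PySem.List.pySetD_of_nonneg _ _ hv.1, PySem.List.pyGetD_of_nonneg _ _ hv.1]
      have hlen' : (st.set v.toNat (st.getD v.toNat [] ++ [z])).length = N := by
        rw [List.length_set]; exact hlen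
      obtain ⟨ih1, ih2⟩ := inner_step N z cs (st.set v.toNat (st.getD v.toNat [] ++ [z])) hlen'
        (fun w hw => hb w (List.mem_cons_of_mem _ hw))
      refine ⟨by rw [List.foldl_cons, hset]; exact ih1, fun j hj => ?_⟩
      rw [List.foldl_cons, hset, ih2 j hj]
      by_cases hjv : v = (j : Int)
      · have hj' : v.toNat = j := by omega
        subst hj'
        have hgd : (st.set v.toNat (st.getD v.toNat [] ++ [z])).getD v.toNat []
            = st.getD v.toNat [] ++ [z] := by
          rw [List.getD_eq_getElem?_getD, List.getElem?_set_self (by omega), Option.getD_some]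
        rw [hgd]
        simp only [List.filter_cons, decide_eq_true hjv, if_true, List.map_cons]
        simp [List.append_assoc]
      · have hne : v.toNat ≠ j := fun hc => hjv (by omega)
        have hgd : (st.set v.toNat (st.getD v.toNat [] ++ [z])).getD j [] = st.getD j [] := by
          rw [List.getD_eq_getElem?_getD, List.getElem?_set_ne hne, ← List.getD_eq_getElem?_getD]
        rw [hgd]
        have hd : decide (v = ((j : Nat) : Int)) = false := decide_eq_false hjv
        simp [hd]

-- the fully built inverted index, bucket by bucket
theorem v2e_build (N : Nat) (chunk : Nat → List Int) :
    ∀ (m : Nat), (∀ f, f < m → ∀ v ∈ chunk f, 0 ≤ v ∧ v < (N : Int)) →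
      ((List.range m).foldl (fun st e => (chunk e).foldl
          (fun st v => PySem.List.pySetD st v (PySem.List.pyGetD st v [] ++ [(e : Int)])) st)
        (List.replicate N ([] : List Int))).length = N ∧
      ∀ j : Nat, j < N →
        ((List.range m).foldl (fun st e => (chunk e).foldl
            (fun st v => PySem.List.pySetD st v (PySem.List.pyGetD st v [] ++ [(e : Int)])) st)
          (List.replicate N ([] : List Int))).getD j []
          = (List.range m).flatMap (fun f =>
              ((chunk f).filter (fun x => decide (x = (j : Int)))).map (fun _ => (f : Int)))
  | 0, _ => by simp
  | m + 1, hb => by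
      obtain ⟨ih1, ih2⟩ := v2e_build N chunk m (fun f hf => hb f (by omega))
      rw [List.range_succ, List.foldl_append, List.foldl_cons, List.foldl_nil]
      obtain ⟨s1, s2⟩ := inner_step N (m : Int) (chunk m) _ ih1 (hb m (by omega))
      refine ⟨s1, fun j hj => ?_⟩
      rw [s2 j hj, ih2 j hj, List.flatMap_append]
      simp

-- v2eF in terms of chunkF
theorem v2eF_eq (ei : List Int) (ne vpe nv : Int) :
    v2eF ei ne vpe nv
      = (List.range ne.toNat).foldl (fun st e => (chunkF ei vpe e).foldl
          (fun st v => PySem.List.pySetD st v (PySem.List.pyGetD st v [] ++ [(e : Int)])) st)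
        (List.replicate nv.toNat ([] : List Int)) := by
  simp only [v2eF, chunkF]
  rw [pyRange_zero_toNat ne]
  simp only [List.foldl_map]

-- the slice B tests membership in IS the chunk, when the flat list is long enough
theorem slice_eq_chunk (ei : List Int) (w f : Nat) (hw : 0 < w) (hlen : f * w + w ≤ ei.length) :
    PySem.List.slice ei (some ((f : Int) * (w : Int))) (some (((f : Int) + 1) * (w : Int)))
      = chunkF ei (w : Int) f := by
  have h1 : ((f : Int) * (w : Int)) = ((f * w : Nat) : Int) := by push_cast; ring
  have h2 : (((f : Int) + 1) * (w : Int)) = (((f + 1) * w : Nat) : Int) := by push_cast; ring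
  rw [h1, h2, PySem.List.slice_natCast]
  have h3 : (f + 1) * w - f * w = w := by rw [Nat.succ_mul]; omega
  rw [h3]
  unfold chunkF
  rw [PySem.List.pyRange_zero_natCast, List.map_map]
  refine List.ext_getElem ?_ (fun i hi1 hi2 => ?_)
  · simp only [List.length_take, List.length_drop, List.length_map, List.length_range]
    omega
  · simp only [List.getElem_take, List.getElem_drop, List.getElem_map, List.getElem_range,
      Function.comp]
    have h4 : ((f : Int) * (w : Int) + (i : Int)) = ((f * w + i : Nat) : Int) := by push_cast; ring
    rw [h4, PySem.List.pyGetD_natCast]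
    have hlt : f * w + i < ei.length := by
      have := List.length_take_le w (ei.drop (f * w))
      simp at hi1
      omega
    rw [List.getD_eq_getElem _ _ hlt]

-- folding Set.add over a constant list adds the constant once (or not at all)
theorem foldl_add_const (z : Int) :
    ∀ (l : List Int) (s : PySem.Set Int),
      (l.map (fun _ => z)).foldl PySem.Set.add s = if l.isEmpty then s else PySem.Set.add s z
  | [], s => rfl
  | x :: l, s => by
      rw [List.map_cons, List.foldl_cons, foldl_add_const z l (PySem.Set.add s z)]
      by_cases h : l.isEmpty <;> simp [h]

-- filtering a constant list
theorem filter_map_const (z : Int) (p : Int → Bool) :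
    ∀ (l : List Int), (l.map (fun _ => z)).filter p = if p z then l.map (fun _ => z) else []
  | [] => by simp
  | x :: l => by
      rw [List.map_cons, List.filter_cons, filter_map_const z p l]
      by_cases h : p z <;> simp [h]

-- a filtered list is nonempty iff the value occurs
theorem contains_iff_filter_nonempty (l : List Int) (v : Int) :
    l.contains v = !((l.filter (fun x => decide (x = v))).isEmpty) := by
  rw [List.contains_eq_mem]
  by_cases h : v ∈ l
  · have h2 : (l.filter (fun x => decide (x = v))) ≠ [] :=
      List.ne_nil_of_mem (List.mem_filter.mpr ⟨h, by simp⟩)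
    simp [h, h2]
  · have h2 : l.filter (fun x => decide (x = v)) = [] :=
      List.filter_eq_nil_iff.mpr (fun a ha hc => h (by simp at hc; rwa [hc] at ha))
    simp [h, h2]

-- the per-element set: A's dedup of concatenated buckets equals B's membership scan
theorem per_element (ei : List Int) (ne vpe nv : Int) (hne : 0 < ne) (hvpe : 0 < vpe)
    (hlen : ne * vpe ≤ ei.length)
    (hv : ∀ f, f < ne.toNat → ∀ v ∈ chunkF ei vpe f, 0 ≤ v ∧ v < nv) (e : Nat) (he : e < ne.toNat) :
    PySem.Set.ofList (((chunkF ei vpe e).flatMap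
        (fun v => PySem.List.pyGetD (v2eF ei ne vpe nv) v [])).filter
      (fun f => decide (f ≠ (e : Int))))
    = (chunkF ei vpe e).foldl (fun s v =>
        (List.range ne.toNat).foldl (fun s (f : Nat) =>
          if (f : Int) ≠ (e : Int) ∧ (PySem.List.slice ei (some ((f : Int) * vpe)) (some (((f : Int) + 1) * vpe))).contains v = true
          then PySem.Set.add s (f : Int) else s) s) ([] : List Int) := by
  have hbucket : ∀ v, 0 ≤ v → v < nv →
      PySem.List.pyGetD (v2eF ei ne vpe nv) v []
        = (List.range ne.toNat).flatMap (fun f =>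
            ((chunkF ei vpe f).filter (fun x => decide (x = v))).map (fun _ => (f : Int))) := by
    intro v h0 h1
    obtain ⟨_, hg⟩ := v2e_build nv.toNat (chunkF ei vpe) ne.toNat
      (fun f hf w hw => ⟨(hv f hf w hw).1, by have := (hv f hf w hw).2; omega⟩)
    rw [PySem.List.pyGetD_of_nonneg _ _ h0, v2eF_eq, hg v.toNat (by omega)]
    have : ((v.toNat : Nat) : Int) = v := by omega
    rw [this]
  rw [PySem.Set.ofList_eq_foldl, List.filter_flatMap, List.foldl_flatMap]
  refine PySem.List.foldl_congr_mem' _ _ _ _ (fun v hvmem s => ?_)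
  have hvb := hv e he v hvmem
  rw [hbucket v hvb.1 hvb.2, List.filter_flatMap, List.foldl_flatMap]
  refine PySem.List.foldl_congr_mem' _ _ _ _ (fun f hf s => ?_)
  have hfn : f < ne.toNat := List.mem_range.mp hf
  have hflen : f * vpe.toNat + vpe.toNat ≤ ei.length := by
    have h1 : (f + 1) * vpe.toNat ≤ ne.toNat * vpe.toNat :=
      Nat.mul_le_mul_right _ (by omega)
    have ha : ((ne.toNat : Nat) : Int) = ne := Int.toNat_of_nonneg hne.le
    have hb : ((vpe.toNat : Nat) : Int) = vpe := Int.toNat_of_nonneg hvpe.le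
    have h2 : ((ne.toNat * vpe.toNat : Nat) : Int) = ne * vpe := by
      rw [Nat.cast_mul, ha, hb]
    have h4 : (f + 1) * vpe.toNat = f * vpe.toNat + vpe.toNat := Nat.succ_mul f vpe.toNat
    omega
  have hvpe' : vpe = ((vpe.toNat : Nat) : Int) := by omega
  rw [filter_map_const]
  by_cases hfe : (f : Int) = (e : Int)
  · simp [hfe]
  · rw [if_pos (by simp [hfe]), foldl_add_const]
    rw [hvpe', slice_eq_chunk ei vpe.toNat f (by omega) hflen, ← hvpe']
    rw [contains_iff_filter_nonempty]
    by_cases hemp : ((chunkF ei vpe f).filter (fun x => decide (x = v))).isEmpty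
    · simp [hfe, hemp]
    · simp [hfe, hemp]

-- the trivial case: no vertices per element, every adjacency set is empty
theorem per_element_trivial (ei : List Int) (ne vpe nv : Int) (hvpe : ¬ 0 < vpe) (e : Nat) :
    PySem.Set.ofList (((chunkF ei vpe e).flatMap
        (fun v => PySem.List.pyGetD (v2eF ei ne vpe nv) v [])).filter
      (fun f => decide (f ≠ (e : Int))))
    = (chunkF ei vpe e).foldl (fun s v =>
        (List.range ne.toNat).foldl (fun s (f : Nat) =>
          if (f : Int) ≠ (e : Int) ∧ (PySem.List.slice ei (some ((f : Int) * vpe)) (some (((f : Int) + 1) * vpe))).contains v = true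
          then PySem.Set.add s (f : Int) else s) s) ([] : List Int) := by
  have hc : chunkF ei vpe e = [] := by
    unfold chunkF
    rw [pyRange_zero_toNat vpe, Int.toNat_of_nonpos (by omega)]
    rfl
  rw [hc]
  rfl

theorem ports_eq (ei : List Int) (ne vpe nv : Int)
    (hpre : Pre_build_element_adjacency ei ne vpe nv) :
    build_element_adjacency ei ne vpe nv = build_element_adjacency_alt ei ne vpe nv := by
  rw [A_norm, B_norm]
  refine List.map_congr_left (fun e he => ?_)
  have hene : e < ne.toNat := List.mem_range.mp he
  have hne : 0 < ne := by omega
  by_cases hvpe : 0 < vpe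
  · obtain ⟨hlen, hbound⟩ := hpre ⟨hne, hvpe⟩
    have hv : ∀ f, f < ne.toNat → ∀ v ∈ chunkF ei vpe f, 0 ≤ v ∧ v < nv := by
      intro f hf v hvmem
      unfold chunkF at hvmem
      rw [pyRange_zero_toNat vpe, List.map_map] at hvmem
      obtain ⟨k, hk, hkv⟩ := List.mem_map.mp hvmem
      have hkw : k < vpe.toNat := List.mem_range.mp hk
      have hbb : ((vpe.toNat : Nat) : Int) = vpe := Int.toNat_of_nonneg hvpe.le
      have hidx : ((f : Int) * vpe + ((k : Nat) : Int)) = ((f * vpe.toNat + k : Nat) : Int) := by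
        rw [Nat.cast_add, Nat.cast_mul, hbb]
      have hlt : f * vpe.toNat + k < (ne * vpe).toNat := by
        have h0 : (f + 1) * vpe.toNat = f * vpe.toNat + vpe.toNat := Nat.succ_mul f vpe.toNat
        have h2 : (f + 1) * vpe.toNat ≤ ne.toNat * vpe.toNat := Nat.mul_le_mul_right _ (by omega)
        have ha : ((ne.toNat : Nat) : Int) = ne := Int.toNat_of_nonneg hne.le
        have hb : ((vpe.toNat : Nat) : Int) = vpe := Int.toNat_of_nonneg hvpe.le
        have h3 : ((ne.toNat * vpe.toNat : Nat) : Int) = ne * vpe := by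
          rw [Nat.cast_mul, ha, hb]
        omega
      have hlt' : f * vpe.toNat + k < ei.length := by
        have : ((ne * vpe).toNat : Int) = ne * vpe := Int.toNat_of_nonneg (by positivity)
        omega
      have hvval : v = ei[f * vpe.toNat + k]'hlt' := by
        rw [← hkv]
        simp only [Function.comp]
        rw [hidx, PySem.List.pyGetD_natCast, List.getD_eq_getElem _ _ hlt']
      have hmem : v ∈ ei.take (ne * vpe).toNat := by
        rw [hvval]
        have hlt2 : f * vpe.toNat + k < (ei.take (ne * vpe).toNat).length := by
          rw [List.length_take]; omega
        have : (ei.take (ne * vpe).toNat)[f * vpe.toNat + k]'hlt2 = ei[f * vpe.toNat + k]'hlt' :=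
          List.getElem_take
        rw [← this]
        exact List.getElem_mem hlt2
      exact hbound v hmem
    exact per_element ei ne vpe nv hne hvpe hlen hv e hene
  · exact per_element_trivial ei ne vpe nv hvpe e

-- ===== VERDICT (by name: the statement is the Claim_ definition above) =====
theorem build_element_adjacency_spec : Claim_equal_build_element_adjacency := by
  intro ei ne vpe nv _ hpre
  unfold Spec_build_element_adjacency
  exact ports_eq ei ne vpe nv hpre
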